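-- pv_equiv track=rewrite | github.com/ohjy1006kenneth/AI-Stock-Trader | services/alpaca/news.py | _normalize_optional_tickers
-- ===== SOURCE A (Python) =====
-- from collections.abc import Mapping, Sequence
--
-- def _normalize_optional_tickers(tickers: Sequence[str] | None) -> tuple[str, ...]:
--     """Normalize an optional sequence of Alpaca news symbols."""
--     if not tickers:
--         return ()
--     normalized = tuple(_normalize_ticker(ticker) for ticker in tickers)
--     deduped = tuple(dict.fromkeys(normalized))
--     if len(deduped) != len(normalized):
--         raise ValueError("tickers must not contain duplicates after normalization")
--     return deduped
--
-- def _normalize_ticker(ticker: str) -> str: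
--     """Normalize one Alpaca news symbol to canonical archive syntax."""
--     if not isinstance(ticker, str):
--         raise TypeError("ticker must be a string")
--     cleaned = ticker.strip().upper().replace(".", "-")
--     if not cleaned:
--         raise ValueError("ticker cannot be empty")
--     return cleaned
-- ===== SOURCE B (Python) =====
-- def _normalize_optional_tickers(tickers):
--     """Normalize an optional sequence of Alpaca news symbols."""
--     if not tickers:
--         return ()
--     # Normalize everything first (so normalization errors surface in input order).
--     normalized = tuple(_normalize_ticker(ticker) for ticker in tickers)
--     # Duplicate detection by sorting: any duplicate pair becomes adjacent in the
--     # sorted order, so one comparison-based scan of neighbours finds it (no hashing).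
--     ordered = sorted(normalized)
--     for prev, cur in zip(ordered, ordered[1:]):
--         if prev == cur:
--             raise ValueError("tickers must not contain duplicates after normalization")
--     return normalized
--
-- def _normalize_ticker(ticker):
--     """Normalize one Alpaca news symbol to canonical archive syntax."""
--     if not isinstance(ticker, str):
--         raise TypeError("ticker must be a string")
--     cleaned = ticker.strip().upper().replace(".", "-")
--     if not cleaned:
--         raise ValueError("ticker cannot be empty")
--     return cleaned
-- ===== Notes on version B (the rewrite author's own statement) =====
-- stated objective: alternative
-- what changed: Replaces A's hash-based dedup (dict.fromkeys then length comparison) with comparison-based duplicate detection: sort the normalized tickers and scan adjacent pairs for equality, returning the normalized tuple itself instead of the rebuilt deduped tuple.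
import Mathlib
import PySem

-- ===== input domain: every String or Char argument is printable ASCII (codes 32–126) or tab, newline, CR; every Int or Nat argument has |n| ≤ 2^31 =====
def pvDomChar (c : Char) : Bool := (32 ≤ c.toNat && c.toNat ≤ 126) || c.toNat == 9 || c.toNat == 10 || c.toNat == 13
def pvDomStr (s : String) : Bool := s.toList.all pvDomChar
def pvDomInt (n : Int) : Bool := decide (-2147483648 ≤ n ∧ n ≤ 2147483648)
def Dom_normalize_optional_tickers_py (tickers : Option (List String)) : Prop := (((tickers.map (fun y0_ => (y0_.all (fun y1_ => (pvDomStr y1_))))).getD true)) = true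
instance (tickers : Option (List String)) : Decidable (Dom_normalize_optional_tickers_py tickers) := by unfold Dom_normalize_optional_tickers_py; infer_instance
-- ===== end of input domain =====

-- B detects duplicates by sorting the normalized tickers and scanning adjacent pairs
-- (comparison-based), instead of A's dict.fromkeys + length comparison; same behaviour where A returns.


-- ===== PORT A =====
-- _normalize_ticker without its raises: Pre_ excludes inputs where it (or the dedup check) raises.
def pyNormTicker (t : String) : String :=
  PySem.Str.replace (PySem.Str.upper (PySem.Str.strip t)) "." "-"

def normalize_optional_tickers_py (tickers : Option (List String)) : List String :=
  match tickers with
  | none => []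
  | some l =>
    if l = [] then []                          -- 'if not tickers: return ()'
    else
      let normalized := l.map pyNormTicker
      let deduped := PySem.List.dedup normalized   -- tuple(dict.fromkeys(normalized))
      if deduped.length ≠ normalized.length then []  -- raise ValueError (outside Pre_)
      else deduped

-- ===== PORT B =====
-- scan of adjacent pairs of the sorted list: true = some neighbours equal (ValueError)
def adjDup : List String → Bool
  | a :: b :: rest => if a = b then true else adjDup (b :: rest)
  | _ => false

def normalize_optional_tickers_py_alt (tickers : Option (List String)) : List String :=
  match tickers with
  | none => []
  | some l =>
    if l = [] then []
    else
      let normalized := l.map pyNormTicker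
      let ordered := PySem.List.sorted normalized (fun x => x) false
      if adjDup ordered then []                -- raise ValueError (outside Pre_)
      else normalized

-- ===== PRECONDITION & SPEC =====
-- Pre_ excludes exactly the inputs on which A raises: a ticker that is empty after
-- normalization (ValueError) or duplicates after normalization (ValueError).
def Pre_normalize_optional_tickers_py (tickers : Option (List String)) : Prop :=
  (∀ t ∈ tickers.getD [], pyNormTicker t ≠ "") ∧ ((tickers.getD []).map pyNormTicker).Nodup
instance (tickers : Option (List String)) : Decidable (Pre_normalize_optional_tickers_py tickers) := by unfold Pre_normalize_optional_tickers_py; infer_instance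

def pvWitness_normalize_optional_tickers_py : Option (List String) := some [" brk.b ", "msft"]

def Spec_normalize_optional_tickers_py (tickers : Option (List String)) (out : List String) : Prop := out = normalize_optional_tickers_py_alt tickers
instance (tickers : Option (List String)) (out : List String) : Decidable (Spec_normalize_optional_tickers_py tickers out) := by unfold Spec_normalize_optional_tickers_py; infer_instance

-- ===== CLAIM =====
def Claim_equal_normalize_optional_tickers_py : Prop := ∀ (tickers : Option (List String)), Dom_normalize_optional_tickers_py tickers → Pre_normalize_optional_tickers_py tickers → Spec_normalize_optional_tickers_py tickers (normalize_optional_tickers_py tickers)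

-- ===== LEMMAS AND PROOFS =====
theorem adjDup_eq_false_of_nodup (xs : List String) (h : xs.Nodup) : adjDup xs = false := by
  induction xs with
  | nil => rfl
  | cons a t ih =>
    cases t with
    | nil => rfl
    | cons b r =>
      have hne : a ≠ b := by
        intro he; exact (List.nodup_cons.mp h).1 (he ▸ List.mem_cons_self ..)
      simp only [adjDup, if_neg hne]
      exact ih (List.nodup_cons.mp h).2

-- ===== VERDICT =====
theorem normalize_optional_tickers_py_spec : Claim_equal_normalize_optional_tickers_py := by
  intro tickers _ hpre
  unfold Spec_normalize_optional_tickers_py normalize_optional_tickers_py normalize_optional_tickers_py_alt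
  match tickers with
  | none => rfl
  | some l =>
    by_cases hl : l = []
    · simp [hl]
    · obtain ⟨-, hnd⟩ := hpre
      simp only [Option.getD_some] at hnd
      have hded : PySem.List.dedup (l.map pyNormTicker) = l.map pyNormTicker := by
        rw [PySem.List.dedup_eq_ofList]; exact PySem.Set.ofList_eq_self_of_nodup _ hnd
      have hsortnd : (PySem.List.sorted (l.map pyNormTicker) (fun x => x) false).Nodup :=
        (PySem.List.sorted_perm (l.map pyNormTicker) (fun x => x) false).nodup_iff.mpr hnd
      show (if l = [] then []
            else if (PySem.List.dedup (l.map pyNormTicker)).length ≠ (l.map pyNormTicker).length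
              then [] else PySem.List.dedup (l.map pyNormTicker)) =
           (if l = [] then []
            else if adjDup (PySem.List.sorted (l.map pyNormTicker) (fun x => x) false)
              then [] else l.map pyNormTicker)
      rw [if_neg hl, if_neg hl, hded, adjDup_eq_false_of_nodup _ hsortnd]
      simp
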